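-- pv_equiv track=rewrite | github.com/hao-ai-lab/MuxServe | benchmark/chatlmsys/scan.py | find_consecutive_number
-- ===== SOURCE A (Python) =====
-- def find_consecutive_number(free_list, n):
--     for i in range(8):
--         lis = list(range(i, i + n))
--         flag = False
--         for l in lis:
--             if l not in free_list:
--                 flag = True
--                 break
--         if flag:
--             continue
--         else:
--             return lis
--     return None
-- ===== SOURCE B (Python) =====
-- def find_consecutive_number(free_list, n):
--     if n <= 0:
--         return []
--     # sliding two-pointer scan: start = current candidate window start, v = next value to test
--     start = 0
--     v = 0
--     while start < 8:
--         if v in free_list: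
--             if v - start + 1 >= n:
--                 return list(range(start, start + n))
--             v += 1
--         else:
--             start = v + 1
--             v = start
--     return None
-- ===== Notes on version B (the rewrite author's own statement) =====
-- stated objective: alternative
-- what changed: Replaced A's per-window rescans (each of the 8 candidate windows rebuilt and rechecked element by element from its start) with a single sliding two-pointer scan that tests each value at most once, jumping the window start past any value found missing.
import Mathlib
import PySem

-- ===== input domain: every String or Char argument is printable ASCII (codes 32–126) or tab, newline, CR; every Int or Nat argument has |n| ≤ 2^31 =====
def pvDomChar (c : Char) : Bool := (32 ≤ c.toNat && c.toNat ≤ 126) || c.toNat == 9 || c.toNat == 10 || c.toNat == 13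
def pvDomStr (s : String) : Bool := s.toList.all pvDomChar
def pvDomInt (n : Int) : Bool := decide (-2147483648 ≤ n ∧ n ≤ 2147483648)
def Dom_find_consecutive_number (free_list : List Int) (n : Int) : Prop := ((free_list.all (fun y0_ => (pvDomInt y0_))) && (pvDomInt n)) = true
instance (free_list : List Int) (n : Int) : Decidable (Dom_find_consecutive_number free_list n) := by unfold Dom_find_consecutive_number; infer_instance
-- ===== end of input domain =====

-- B replaces A's per-window element-by-element rescans by a single sliding two-pointer
-- scan that never re-tests a value already known to be free (objective: alternative).

-- ===== PORT A =====
-- inner 'for l in lis: if l not in free_list: flag = True; break'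
def pvA_flag (free_list : List Int) : List Int → Bool
  | [] => false
  | l :: rest => if !(free_list.contains l) then true else pvA_flag free_list rest

-- outer 'for i in range(8)' with early return
def pvA_loop (free_list : List Int) (n : Int) : List Int → Option (List Int)
  | [] => none
  | i :: rest =>
      let lis := PySem.List.pyRange i (i + n) 1
      let flag := pvA_flag free_list lis
      if flag then pvA_loop free_list n rest else some lis

def find_consecutive_number (free_list : List Int) (n : Int) : Option (List Int) :=
  pvA_loop free_list n (PySem.List.pyRange 0 8 1)

-- ===== PORT B =====
-- the 'while start < 8' loop of Source B, with fuel: every iteration increases v by 1 and the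
-- loop returns once v - start + 1 = n, so (n + 9).toNat iterations always suffice from (0, 0)
def pvB_scan (free_list : List Int) (n : Int) : Nat → Int → Int → Option (List Int)
  | 0, _, _ => none
  | fuel + 1, start, v =>
      if start < 8 then
        if free_list.contains v then
          if n ≤ v - start + 1 then some (PySem.List.pyRange start (start + n) 1)
          else pvB_scan free_list n fuel start (v + 1)
        else pvB_scan free_list n fuel (v + 1) (v + 1)
      else none

def find_consecutive_number_alt (free_list : List Int) (n : Int) : Option (List Int) :=
  if n ≤ 0 then some [] else pvB_scan free_list n (n + 9).toNat 0 0

-- ===== PRECONDITION & SPEC =====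
def Spec_find_consecutive_number (free_list : List Int) (n : Int) (out : Option (List Int)) : Prop := out = find_consecutive_number_alt free_list n
instance (free_list : List Int) (n : Int) (out : Option (List Int)) : Decidable (Spec_find_consecutive_number free_list n out) := by unfold Spec_find_consecutive_number; infer_instance

-- ===== CLAIM (what is proved, stated in full; the proofs are below) =====
def Claim_equal_find_consecutive_number : Prop := ∀ (free_list : List Int) (n : Int), Dom_find_consecutive_number free_list n → Spec_find_consecutive_number free_list n (find_consecutive_number free_list n)

-- ===== LEMMAS AND PROOFS =====

theorem pvA_flag_false_iff (fl : List Int) :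
    ∀ (lis : List Int), pvA_flag fl lis = false ↔ ∀ l ∈ lis, fl.contains l = true := by
  intro lis
  induction lis with
  | nil => simp [pvA_flag]
  | cons l rest ih =>
      simp only [pvA_flag, List.mem_cons]
      by_cases h : fl.contains l = true
      · have hm : l ∈ fl := by simpa using h
        simp [hm, ih]
      · have hb : (!fl.contains l) = true := by simpa using h
        rw [if_pos hb]
        constructor
        · intro hfalse
          exact absurd hfalse (by simp)
        · intro hall
          exact absurd (hall l (Or.inl rfl)) h

-- all starts a..v fail, so A's loop over [a, 8) reduces to its loop over [v+1, 8)
theorem pv_skip (fl : List Int) (n : Int) (v : Int) :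
    ∀ (k : Nat) (a : Int), v + 1 - a = (k : Int) →
      (∀ s, a ≤ s → s ≤ v → pvA_flag fl (PySem.List.pyRange s (s + n) 1) = true) →
      pvA_loop fl n (PySem.List.pyRange a 8 1) = pvA_loop fl n (PySem.List.pyRange (v + 1) 8 1) := by
  intro k
  induction k with
  | zero =>
      intro a ha _
      have : a = v + 1 := by omega
      rw [this]
  | succ k ih =>
      intro a ha hbad
      have hav : a ≤ v := by omega
      by_cases h8 : a < 8
      · rw [PySem.List.pyRange_one_cons h8]
        simp only [pvA_loop]
        rw [hbad a le_rfl hav, if_pos rfl]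
        exact ih (a + 1) (by omega) (fun s hs hsv => hbad s (by omega) hsv)
      · rw [PySem.List.pyRange_one_eq_nil (by omega), PySem.List.pyRange_one_eq_nil (by omega : (8:Int) ≤ v + 1)]

theorem pvB_scan_eq (fl : List Int) (n : Int) :
    ∀ (fuel : Nat) (start v : Int), 0 ≤ start → start ≤ v → v - start ≤ n - 1 →
      (∀ x, start ≤ x → x < v → fl.contains x = true) →
      8 + n - v < (fuel : Int) →
      pvB_scan fl n fuel start v = pvA_loop fl n (PySem.List.pyRange start 8 1) := by
  intro fuel
  induction fuel with
  | zero =>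
      intro start v _ hsv hgap _ hfuel
      -- fuel 0 forces v > 8 + n, hence start > 9: A's range is empty too
      rw [PySem.List.pyRange_one_eq_nil (by omega)]
      rfl
  | succ fuel ih =>
      intro start v hs hsv hgap hinv hfuel
      simp only [pvB_scan]
      by_cases h8 : start < 8
      · rw [if_pos h8]
        by_cases hc : fl.contains v = true
        · rw [if_pos hc]
          by_cases hwin : n ≤ v - start + 1
          · rw [if_pos hwin]
            rw [PySem.List.pyRange_one_cons h8]
            simp only [pvA_loop]
            have hflag : pvA_flag fl (PySem.List.pyRange start (start + n) 1) = false := by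
              rw [pvA_flag_false_iff]
              intro l hl
              rw [PySem.List.mem_pyRange_one] at hl
              by_cases hlv : l = v
              · rw [hlv]; exact hc
              · exact hinv l hl.1 (by omega)
            rw [hflag, if_neg (by simp)]
          · rw [if_neg hwin]
            exact ih start (v + 1) hs (by omega) (by omega)
              (fun x hx hxv => by
                by_cases hxv' : x = v
                · rw [hxv']; exact hc
                · exact hinv x hx (by omega))
              (by push_cast at hfuel ⊢; omega)
        · rw [if_neg hc]
          have hrec := ih (v + 1) (v + 1) (by omega) le_rfl (by omega)
            (fun x hx hxv => absurd hxv (by omega))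
            (by push_cast at hfuel ⊢; omega)
          rw [hrec]
          refine (pv_skip fl n v ((v + 1 - start).toNat) start (by omega) ?_).symm
          intro s hs' hsv'
          -- the window starting at s contains v, which is not free
          cases hq : pvA_flag fl (PySem.List.pyRange s (s + n) 1) with
          | true => rfl
          | false =>
              exfalso
              have := (pvA_flag_false_iff fl _).mp hq v
                (by rw [PySem.List.mem_pyRange_one]; omega)
              exact hc this
      · rw [if_neg h8, PySem.List.pyRange_one_eq_nil (by omega)]
        rfl

-- ===== VERDICT (by name: the statement is the Claim_ definition above) =====
theorem find_consecutive_number_spec : Claim_equal_find_consecutive_number := by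
  intro fl n _dom
  unfold Spec_find_consecutive_number find_consecutive_number find_consecutive_number_alt
  by_cases hn : n ≤ 0
  · rw [if_pos hn]
    rw [PySem.List.pyRange_one_cons (by norm_num)]
    simp only [pvA_loop]
    rw [PySem.List.pyRange_one_eq_nil (by omega)]
    simp [pvA_flag]
  · rw [if_neg hn]
    refine (pvB_scan_eq fl n (n + 9).toNat 0 0 le_rfl le_rfl (by omega)
      (fun x hx hxv => by omega) (by omega)).symm
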